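-- pv_equiv track=rewrite | github.com/databricks/cli | bundle/direct/tools/generate_resources.py | generate
-- ===== SOURCE A (Python) =====
-- def filter_prefixes(fields):
--     """Remove fields that are children of other fields in the list."""
--     result = []
--     for field, behavior in sorted(fields):
--         if not any(field.startswith(f + ".") for f, _ in result):
--             result.append((field, behavior))
--     return result
--
-- def write_field_group(lines, header, fields):
--     """Write a group of fields with behavior type comments."""
--     lines.append(f"\n    {header}:")
--     by_behavior = {}
--     for field, behavior in fields:
--         by_behavior.setdefault(behavior, []).append(field)
--     first = True
--     for behavior in sorted(by_behavior):
--         if not first: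
--             lines.append("")
--         first = False
--         lines.append(f"      # {behavior}:")
--         for field in by_behavior[behavior]:
--             lines.append(f"      - {field}")
--
-- def generate(resource_behaviors):
--     """Generate resources.yml."""
--     lines = [
--         """# Generated, do not edit. API field behaviors from OpenAPI schema.
-- #
-- # For manual edits and schema description, see resources.yml.
--
-- resources:"""
--     ]
--
--     for resource in sorted(resource_behaviors):
--         behaviors = resource_behaviors[resource]
--
--         ignore_remote, recreate = [], []
--         for field, fb in sorted(behaviors.items()):
--             if "OUTPUT_ONLY" in fb:
--                 ignore_remote.append((field, "OUTPUT_ONLY"))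
--             elif "INPUT_ONLY" in fb:
--                 ignore_remote.append((field, "INPUT_ONLY"))
--             if "IMMUTABLE" in fb:
--                 recreate.append((field, "IMMUTABLE"))
--
--         ignore_remote = filter_prefixes(ignore_remote)
--         recreate = filter_prefixes(recreate)
--
--         if not ignore_remote and not recreate:
--             lines.append(f"\n  # {resource}: no api field behaviors")
--             continue
--
--         lines.append(f"\n  {resource}:")
--
--         if recreate:
--             write_field_group(lines, "recreate_on_changes", recreate)
--
--         if ignore_remote:
--             write_field_group(lines, "ignore_remote_changes", ignore_remote)
--
--     while lines and lines[-1] == "":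
--         lines.pop()
--
--     return "\n".join(lines)
-- ===== SOURCE B (Python) =====
-- _HEADER = """# Generated, do not edit. API field behaviors from OpenAPI schema.
-- #
-- # For manual edits and schema description, see resources.yml.
--
-- resources:"""
--
--
-- def _prune(pairs):
--     """Drop pairs whose field has a dot-ancestor among the listed fields.
--
--     pairs is sorted by field with distinct fields, so a field survives exactly
--     when no other listed field is a dot-ancestor of it; each dot-prefix of the
--     field is tested against a set of the listed field names.
--     """
--     names = {f for f, _ in pairs}
--
--     def has_ancestor(field):
--         for i, c in enumerate(field):
--             if c == "." and field[:i] in names: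
--                 return True
--         return False
--
--     return [(f, b) for f, b in pairs if not has_ancestor(f)]
--
--
-- def _group(header, pairs):
--     """Render a field group: one block per behavior (sorted), blank-line separated."""
--     blocks = [
--         ["      # {}:".format(b)] + ["      - {}".format(f) for f, fb in pairs if fb == b]
--         for b in sorted({b for _, b in pairs})
--     ]
--     body = []
--     for block in blocks:
--         if body:
--             body.append("")
--         body.extend(block)
--     return ["\n    {}:".format(header)] + body
--
--
-- def generate(resource_behaviors):
--     """Generate resources.yml."""
--     parts = [_HEADER]
--     for resource, behaviors in sorted(resource_behaviors.items()):
--         ignore_remote, recreate = [], []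
--         for field, fb in sorted(behaviors.items()):
--             if "OUTPUT_ONLY" in fb:
--                 ignore_remote.append((field, "OUTPUT_ONLY"))
--             elif "INPUT_ONLY" in fb:
--                 ignore_remote.append((field, "INPUT_ONLY"))
--             if "IMMUTABLE" in fb:
--                 recreate.append((field, "IMMUTABLE"))
--
--         ignore_remote = _prune(ignore_remote)
--         recreate = _prune(recreate)
--
--         if not ignore_remote and not recreate:
--             parts.append("\n  # {}: no api field behaviors".format(resource))
--             continue
--
--         parts.append("\n  {}:".format(resource))
--         if recreate:
--             parts.extend(_group("recreate_on_changes", recreate))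
--         if ignore_remote:
--             parts.extend(_group("ignore_remote_changes", ignore_remote))
--
--     return "\n".join(parts)
-- ===== Notes on version B (the rewrite author's own statement) =====
-- stated objective: alternative
-- what changed: filter_prefixes' rescan of the kept list per field is replaced by a set-membership test of each dot-prefix of the field, and the dict-setdefault grouping plus first-flag blank-line logic is replaced by comprehension-built per-behavior blocks joined with separators; the never-firing trailing-pop loop is dropped.
import Mathlib
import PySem

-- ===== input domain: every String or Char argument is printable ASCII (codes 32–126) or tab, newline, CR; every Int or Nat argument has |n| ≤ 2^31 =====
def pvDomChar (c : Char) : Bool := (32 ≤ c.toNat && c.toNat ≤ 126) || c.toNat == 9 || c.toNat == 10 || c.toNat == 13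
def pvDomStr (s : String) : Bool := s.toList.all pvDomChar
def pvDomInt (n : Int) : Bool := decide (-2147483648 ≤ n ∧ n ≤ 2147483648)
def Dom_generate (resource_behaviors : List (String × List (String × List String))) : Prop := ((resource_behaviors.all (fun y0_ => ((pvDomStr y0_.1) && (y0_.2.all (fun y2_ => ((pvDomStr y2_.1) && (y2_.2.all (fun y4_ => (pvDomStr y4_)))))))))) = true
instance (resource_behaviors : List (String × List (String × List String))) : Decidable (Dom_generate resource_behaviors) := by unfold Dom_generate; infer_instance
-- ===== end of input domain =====

-- B replaces A's kept-list rescan in filter_prefixes by a set-membership test of each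
-- dot-prefix of the field, and the dict grouping by comprehension-built blocks; same output.

-- ===== PORT A =====
def pvHeader : String := "# Generated, do not edit. API field behaviors from OpenAPI schema.\n#\n# For manual edits and schema description, see resources.yml.\n\nresources:"
-- sorted(fields) on (str, str) pairs: Python compares tuples lexicographically = Lex order
def sortPairs (fields : List (String × String)) : List (String × String) :=
  PySem.List.sorted fields (fun p => (toLex p : Lex (String × String))) false

def filterPrefixes (fields : List (String × String)) : List (String × String) :=
  (sortPairs fields).foldl
    (fun result fb =>
      if (result.any (fun g => PySem.Str.startswith fb.1 (g.1 ++ "."))) then result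
      else result ++ [fb])
    []

def writeFieldGroup (lines : List String) (header : String) (fields : List (String × String)) : List String :=
  let lines := lines ++ ["\n    " ++ header ++ ":"]
  -- by_behavior.setdefault(behavior, []).append(field)  =  d[b] = d.get(b, []) + [f]
  let byBehavior : PySem.Dict String (List String) :=
    fields.foldl (fun d fb => d.modify fb.2 [] (fun fs => fs ++ [fb.1])) PySem.Dict.empty
  ((PySem.List.sorted byBehavior.keys (fun b => b) false).foldl
    (fun (acc : List String × Bool) behavior =>
      let lines := if acc.2 then acc.1 else acc.1 ++ [""]
      let lines := lines ++ ["      # " ++ behavior ++ ":"]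
      -- by_behavior[behavior]: the key comes from this dict, KeyError impossible
      (lines ++ (byBehavior.getD behavior []).map (fun f => "      - " ++ f), false))
    (lines, true)).1

-- while lines and lines[-1] == "": lines.pop()
def dropTrailingEmpty : List String → List String
  | [] => []
  | x :: xs =>
    let r := dropTrailingEmpty xs
    if r.isEmpty && x == "" then [] else x :: r

def resourceStepA (d : PySem.Dict String (List (String × List String)))
    (lines : List String) (resource : String) : List String :=
  -- resource_behaviors[resource]: the key comes from this dict, KeyError impossible
  let behaviors : PySem.Dict String (List String) := PySem.Dict.ofList (d.getD resource [])
  -- sorted(behaviors.items()): dict keys are distinct, so Python's tuple sort is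
  -- exactly the stable sort by key
  let items := PySem.List.sorted behaviors.items (fun p => p.1) false
  let acc := items.foldl
    (fun acc p =>
      let ig := if p.2.contains "OUTPUT_ONLY" then acc.1 ++ [(p.1, "OUTPUT_ONLY")]
        else if p.2.contains "INPUT_ONLY" then acc.1 ++ [(p.1, "INPUT_ONLY")]
        else acc.1
      let rc := if p.2.contains "IMMUTABLE" then acc.2 ++ [(p.1, "IMMUTABLE")] else acc.2
      (ig, rc))
    ([], [])
  let ignoreRemote := filterPrefixes acc.1
  let recreate := filterPrefixes acc.2
  if ignoreRemote.isEmpty && recreate.isEmpty then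
    lines ++ ["\n  # " ++ resource ++ ": no api field behaviors"]
  else
    let lines := lines ++ ["\n  " ++ resource ++ ":"]
    let lines := if !recreate.isEmpty then writeFieldGroup lines "recreate_on_changes" recreate else lines
    if !ignoreRemote.isEmpty then writeFieldGroup lines "ignore_remote_changes" ignoreRemote else lines

def generate (resource_behaviors : List (String × List (String × List String))) : String :=
  let d := PySem.Dict.ofList resource_behaviors
  let lines := (PySem.List.sorted d.keys (fun r => r) false).foldl (resourceStepA d) [pvHeader]
  PySem.Str.join "\n" (dropTrailingEmpty lines)

-- ===== PORT B =====
def pvHeaderAlt : String := "# Generated, do not edit. API field behaviors from OpenAPI schema.\n#\n# For manual edits and schema description, see resources.yml.\n\nresources:"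

-- for i, c in enumerate(field): if c == "." and field[:i] in names: return True
def hasAncAux (names : PySem.Set String) : List Char → List Char → Bool
  | _, [] => false
  | pref, c :: rest =>
    if c == '.' && names.contains (String.ofList pref) then true
    else hasAncAux names (pref ++ [c]) rest

def hasAncestor (names : PySem.Set String) (field : String) : Bool :=
  hasAncAux names [] field.toList

def prune (pairs : List (String × String)) : List (String × String) :=
  let names : PySem.Set String := PySem.Set.ofList (pairs.map (fun p => p.1))
  pairs.filter (fun p => !hasAncestor names p.1)

def chunk (b : String) (pairs : List (String × String)) : List String :=
  ("      # " ++ b ++ ":") :: (pairs.filter (fun p => p.2 == b)).map (fun p => "      - " ++ p.1)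

def group (header : String) (pairs : List (String × String)) : List String :=
  let blocks := (PySem.List.sorted (PySem.Set.ofList (pairs.map (fun p => p.2))) (fun b => b) false).map
    (fun b => chunk b pairs)
  let body := blocks.foldl (fun body block => (if body.isEmpty then body else body ++ [""]) ++ block) []
  ("\n    " ++ header ++ ":") :: body

def resourceStepB (parts : List String) (rb : String × List (String × List String)) : List String :=
  let behaviors : PySem.Dict String (List String) := PySem.Dict.ofList rb.2
  -- sorted(behaviors.items()): dict keys are distinct, so Python's tuple sort is
  -- exactly the stable sort by key
  let items := PySem.List.sorted behaviors.items (fun p => p.1) false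
  let acc := items.foldl
    (fun acc p =>
      let ig := if p.2.contains "OUTPUT_ONLY" then acc.1 ++ [(p.1, "OUTPUT_ONLY")]
        else if p.2.contains "INPUT_ONLY" then acc.1 ++ [(p.1, "INPUT_ONLY")]
        else acc.1
      let rc := if p.2.contains "IMMUTABLE" then acc.2 ++ [(p.1, "IMMUTABLE")] else acc.2
      (ig, rc))
    ([], [])
  let ignoreRemote := prune acc.1
  let recreate := prune acc.2
  if ignoreRemote.isEmpty && recreate.isEmpty then
    parts ++ ["\n  # " ++ rb.1 ++ ": no api field behaviors"]
  else
    let parts := parts ++ ["\n  " ++ rb.1 ++ ":"]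
    let parts := if !recreate.isEmpty then parts ++ group "recreate_on_changes" recreate else parts
    if !ignoreRemote.isEmpty then parts ++ group "ignore_remote_changes" ignoreRemote else parts

def generate_alt (resource_behaviors : List (String × List (String × List String))) : String :=
  let d := PySem.Dict.ofList resource_behaviors
  -- sorted(resource_behaviors.items()): dict keys are distinct, so Python's tuple
  -- sort is exactly the stable sort by key
  let parts := (PySem.List.sorted d.items (fun p => p.1) false).foldl resourceStepB [pvHeaderAlt]
  PySem.Str.join "\n" parts

-- ===== PRECONDITION & SPEC =====
def Spec_generate (resource_behaviors : List (String × List (String × List String))) (out : String) : Prop := out = generate_alt resource_behaviors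
instance (resource_behaviors : List (String × List (String × List String))) (out : String) : Decidable (Spec_generate resource_behaviors out) := by unfold Spec_generate; infer_instance

-- ===== CLAIM (what is proved, stated in full; the proofs are below) =====
def Claim_equal_generate : Prop := ∀ (resource_behaviors : List (String × List (String × List String))), Dom_generate resource_behaviors → Spec_generate resource_behaviors (generate resource_behaviors)

-- ===== LEMMAS AND PROOFS =====

-- "g is a dot-ancestor of f": g + "." is a prefix of f
def AncIn (ps : List (String × String)) (f : String) : Prop :=
  ∃ g ∈ ps, g.1.toList ++ ['.'] <+: f.toList

def anyAncB (ps : List (String × String)) (f : String) : Bool :=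
  ps.any (fun g => PySem.Str.startswith f (g.1 ++ "."))

theorem list_lt_append_cons (l : List Char) (a : Char) (r : List Char) : l < l ++ a :: r := by
  induction l with
  | nil => exact List.Lex.nil
  | cons c cs ih => exact List.Lex.cons ih

theorem string_lt_of_anc {s t : String} (h : s.toList ++ ['.'] <+: t.toList) : s < t := by
  rw [String.lt_iff_toList_lt]
  obtain ⟨u, hu⟩ := h
  rw [← hu]
  simpa [List.append_assoc] using list_lt_append_cons s.toList '.' u

theorem hasAncAux_iff (names : PySem.Set String) (rest pref : List Char) :
    hasAncAux names pref rest = true ↔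
      ∃ mid tail, rest = mid ++ '.' :: tail ∧ names.contains (String.ofList (pref ++ mid)) = true := by
  induction rest generalizing pref with
  | nil =>
    simp only [hasAncAux]
    constructor
    · intro h; cases h
    · rintro ⟨mid, tail, h, -⟩
      exact absurd h.symm (List.append_ne_nil_of_right_ne_nil _ (List.cons_ne_nil _ _))
  | cons c cs ih =>
    by_cases hc : (c == '.' && names.contains (String.ofList pref)) = true
    · simp only [hasAncAux, hc, if_true]
      obtain ⟨hc1, hc2⟩ := Bool.and_eq_true_iff.mp hc
      constructor
      · intro _
        exact ⟨[], cs, by simp [(beq_iff_eq).mp hc1], by simpa using hc2⟩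
      · intro _; trivial
    · rw [Bool.not_eq_true] at hc
      simp only [hasAncAux, hc, Bool.false_eq_true, if_false]
      rw [ih]
      constructor
      · rintro ⟨mid, tail, hrest, hmem⟩
        exact ⟨c :: mid, tail, by rw [List.cons_append, hrest],
          by simpa [List.append_assoc] using hmem⟩
      · rintro ⟨mid, tail, hrest, hmem⟩
        cases mid with
        | nil =>
          simp only [List.nil_append] at hrest
          obtain ⟨hc1, hc2⟩ := List.cons.injEq _ _ _ _ ▸ hrest
          exfalso
          have : (c == '.' && names.contains (String.ofList pref)) = true := by
            rw [List.cons_eq_cons] at hrest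
            simp only [List.append_nil] at hmem
            exact Bool.and_eq_true_iff.mpr ⟨beq_iff_eq.mpr hrest.1, hmem⟩
          rw [this] at hc; cases hc
        | cons m ms =>
          rw [List.cons_append, List.cons_eq_cons] at hrest
          refine ⟨ms, tail, hrest.2, ?_⟩
          have hcm : c = m := hrest.1
          simpa [List.append_assoc, hcm] using hmem

theorem hasAncestor_iff (ps : List (String × String)) (f : String) :
    hasAncestor (PySem.Set.ofList (ps.map (fun p => p.1))) f = true ↔ AncIn ps f := by
  rw [hasAncestor, hasAncAux_iff]
  constructor
  · rintro ⟨mid, tail, hsplit, hmem⟩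
    rw [PySem.Set.contains_iff, PySem.Set.mem_ofList] at hmem
    simp only [List.nil_append] at hmem
    obtain ⟨g, hg, hge⟩ := List.mem_map.mp hmem
    refine ⟨g, hg, tail, ?_⟩
    have hgl : g.1.toList = mid := by rw [hge, String.toList_ofList]
    rw [hgl, hsplit]
    simp [List.append_assoc]
  · rintro ⟨g, hg, u, hu⟩
    refine ⟨g.1.toList, u, ?_, ?_⟩
    · rw [← hu]; simp [List.append_assoc]
    · rw [PySem.Set.contains_iff, PySem.Set.mem_ofList]
      simp only [List.nil_append, String.ofList_toList]
      exact List.mem_map_of_mem hg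

theorem anyAnc_iff (res : List (String × String)) (f : String) :
    anyAncB res f = true ↔ AncIn res f := by
  rw [anyAncB, List.any_eq_true]
  refine exists_congr fun g => and_congr_right fun _ => ?_
  have ht : (g.1 ++ ".").toList = g.1.toList ++ ['.'] := by rw [String.toList_append]; rfl
  rw [PySem.Str.startswith_eq, PySem.Chars.startswith_iff, ht]

-- the heart: against a sorted, duplicate-free field list, testing A's kept prefix list
-- equals testing the whole list
theorem step_any (ps done : List (String × String)) (p : String × String)
    (rest : List (String × String))
    (hsplit : ps = done ++ p :: rest) (hp : ps.Pairwise (fun a b => a.1 < b.1)) :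
    anyAncB (done.filter fun q => !anyAncB ps q.1) p.1 = anyAncB ps p.1 := by
  refine Bool.coe_iff_coe.mp ?_
  rw [anyAnc_iff, anyAnc_iff]
  constructor
  · rintro ⟨g, hg, hpre⟩
    exact ⟨g, by rw [hsplit]; exact List.mem_append_left _ (List.mem_of_mem_filter hg), hpre⟩
  · rintro ⟨g, hg, hpre⟩
    have hgS : g ∈ ps.filter (fun q => decide (q.1.toList ++ ['.'] <+: p.1.toList)) :=
      List.mem_filter.mpr ⟨hg, decide_eq_true hpre⟩
    obtain ⟨q0, hq0mem, hq0min⟩ :=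
      Finset.exists_min_image
        (ps.filter (fun q => decide (q.1.toList ++ ['.'] <+: p.1.toList))).toFinset
        (fun q => q.1.toList.length) ⟨g, List.mem_toFinset.mpr hgS⟩
    rw [List.mem_toFinset] at hq0mem
    have hq0ps : q0 ∈ ps := (List.mem_filter.mp hq0mem).1
    have hq0anc : q0.1.toList ++ ['.'] <+: p.1.toList :=
      of_decide_eq_true (List.mem_filter.mp hq0mem).2
    have hq0pred : anyAncB ps q0.1 = false := by
      by_contra hcon
      rw [Bool.not_eq_false] at hcon
      obtain ⟨r, hr, hrpre⟩ := (anyAnc_iff ps q0.1).mp hcon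
      have hrp : r.1.toList ++ ['.'] <+: p.1.toList :=
        (hrpre.trans (List.prefix_append _ _)).trans hq0anc
      have hrS : r ∈ ps.filter (fun q => decide (q.1.toList ++ ['.'] <+: p.1.toList)) :=
        List.mem_filter.mpr ⟨hr, decide_eq_true hrp⟩
      have hmin := hq0min r (List.mem_toFinset.mpr hrS)
      have hlen := hrpre.length_le
      simp only [List.length_append, List.length_cons, List.length_nil] at hlen
      omega
    have hlt : q0.1 < p.1 := string_lt_of_anc hq0anc
    have hq0done : q0 ∈ done := by
      rw [hsplit] at hq0ps
      rcases List.mem_append.mp hq0ps with h | h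
      · exact h
      · rcases List.mem_cons.mp h with he | ht
        · rw [he] at hlt; exact absurd hlt (lt_irrefl _)
        · rw [hsplit] at hp
          have hplt := (List.pairwise_cons.mp (List.pairwise_append.mp hp).2.1).1 q0 ht
          exact absurd (hlt.trans hplt) (lt_irrefl _)
    exact ⟨q0, List.mem_filter.mpr ⟨hq0done, by rw [hq0pred]; rfl⟩, hq0anc⟩

theorem fp_aux (ps : List (String × String)) (hp : ps.Pairwise (fun a b => a.1 < b.1)) :
    ∀ (todo done : List (String × String)), ps = done ++ todo →
      todo.foldl (fun result fb => if anyAncB result fb.1 then result else result ++ [fb])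
        (done.filter fun q => !anyAncB ps q.1)
      = ps.filter fun q => !anyAncB ps q.1 := by
  intro todo
  induction todo with
  | nil =>
    intro done h
    rw [List.append_nil] at h
    rw [List.foldl_nil, ← h]
  | cons p rest ih =>
    intro done h
    rw [List.foldl_cons]
    have hs := step_any ps done p rest h hp
    have hstep : (if anyAncB (done.filter fun q => !anyAncB ps q.1) p.1
          then done.filter fun q => !anyAncB ps q.1
          else (done.filter fun q => !anyAncB ps q.1) ++ [p])
        = (done ++ [p]).filter fun q => !anyAncB ps q.1 := by
      rw [hs]
      cases hb : anyAncB ps p.1 <;> simp [List.filter_append, hb]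
    rw [hstep]
    exact ih (done ++ [p]) (by rw [h, List.append_assoc]; rfl)

theorem filterPrefixes_eq_prune (ps : List (String × String))
    (hp : ps.Pairwise (fun a b => a.1 < b.1)) : filterPrefixes ps = prune ps := by
  have hsort : sortPairs ps = ps :=
    PySem.List.sorted_eq_self_of_pairwise ps _
      (hp.imp fun h => Prod.Lex.toLex_le_toLex.mpr (Or.inl h))
  have hmain : filterPrefixes ps = ps.filter fun q => !anyAncB ps q.1 := by
    show (sortPairs ps).foldl
        (fun result fb => if anyAncB result fb.1 then result else result ++ [fb]) [] = _
    rw [hsort]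
    have h0 : ([] : List (String × String)) = [].filter fun q => !anyAncB ps q.1 := rfl
    rw [h0]
    exact fp_aux ps hp ps [] rfl
  rw [hmain, prune]
  refine (List.filter_congr fun q hq => ?_).symm
  have : hasAncestor (PySem.Set.ofList (ps.map fun p => p.1)) q.1 = anyAncB ps q.1 :=
    Bool.coe_iff_coe.mp ((hasAncestor_iff ps q.1).trans (anyAnc_iff ps q.1).symm)
  rw [this]

theorem byBehavior_keys (ps : List (String × String)) :
    (ps.foldl (fun d fb => d.modify fb.2 [] (fun fs => fs ++ [fb.1])) PySem.Dict.empty).keys =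
      PySem.Set.ofList (ps.map (fun p => p.2)) := by
  rw [PySem.Dict.keys_foldl_modify_key ps (fun fb => fb.2) [] (fun _ fb => fun fs => fs ++ [fb.1])]
  rfl

theorem byBehavior_getD (ps : List (String × String)) (b : String) :
    (ps.foldl (fun d fb => d.modify fb.2 [] (fun fs => fs ++ [fb.1])) PySem.Dict.empty).getD b [] =
      (ps.filter (fun p => p.2 == b)).map (fun p => p.1) := by
  have hswap : ps.foldl (fun d fb => d.modify fb.2 [] (fun fs => fs ++ [fb.1])) PySem.Dict.empty
      = (ps.map Prod.swap).foldl (fun d q => d.modify q.1 [] (fun fs => fs ++ [q.2]))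
          PySem.Dict.empty := by
    rw [List.foldl_map]
    rfl
  rw [hswap, PySem.Dict.getD_foldl_modify_append]
  rw [List.filter_map]
  simp [List.map_map, Function.comp_def, PySem.Dict.getD_empty]

theorem wfg_aux (ps : List (String × String)) (ks : List String) :
    ∀ (lines body : List String), body ≠ [] →
      (ks.foldl (fun (acc : List String × Bool) behavior =>
          (((if acc.2 then acc.1 else acc.1 ++ [""]) ++ ["      # " ++ behavior ++ ":"]) ++
            ((ps.filter (fun p => p.2 == behavior)).map (fun p => p.1)).map
              (fun f => "      - " ++ f), false))
        (lines ++ body, false)).1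
      = lines ++ (ks.map (fun b => chunk b ps)).foldl
          (fun body block => (if body.isEmpty then body else body ++ [""]) ++ block) body := by
  induction ks with
  | nil => intro lines body _; rfl
  | cons b ks ih =>
    intro lines body hb
    have hbe : body.isEmpty = false := by
      cases body with
      | nil => exact absurd rfl hb
      | cons _ _ => rfl
    rw [List.foldl_cons, List.map_cons, List.foldl_cons]
    have h := ih lines (body ++ ([""] ++ chunk b ps))
      (List.append_ne_nil_of_left_ne_nil hb _)
    simpa [chunk, hbe, List.map_map, Function.comp, List.append_assoc] using h

theorem writeFieldGroup_eq (lines : List String) (header : String) (ps : List (String × String)) :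
    writeFieldGroup lines header ps = lines ++ group header ps := by
  unfold writeFieldGroup group
  dsimp only
  simp only [byBehavior_keys, byBehavior_getD]
  cases hks : PySem.List.sorted (PySem.Set.ofList (ps.map fun p => p.2)) (fun b => b) false with
  | nil => simp
  | cons b ks =>
    rw [List.foldl_cons, List.map_cons, List.foldl_cons]
    have h := wfg_aux ps ks (lines ++ ["\n    " ++ header ++ ":"]) (chunk b ps)
      (List.cons_ne_nil _ _)
    simpa [chunk, List.map_map, Function.comp, List.append_assoc] using h

-- everything below: last line is never the empty string, so A's trailing pop is a no-op
def GoodLast (l : List String) : Prop := l.getLast? ≠ some ""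

theorem goodLast_append (l1 l2 : List String) (h2 : GoodLast l2) (hne : l2 ≠ []) :
    GoodLast (l1 ++ l2) := by
  rw [GoodLast, List.getLast?_append_of_ne_nil l1 hne]; exact h2

theorem str_toList_ne_nil {a : String} (h : a.toList ≠ []) : a ≠ "" :=
  fun he => h (by rw [he]; rfl)

theorem goodLast_of_forall (l : List String) (h : ∀ x ∈ l, x ≠ "") : GoodLast l := by
  rw [GoodLast]
  intro he
  exact h "" (List.mem_of_getLast? he) rfl

theorem chunk_good (b : String) (ps : List (String × String)) :
    chunk b ps ≠ [] ∧ GoodLast (chunk b ps) := by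
  refine ⟨List.cons_ne_nil _ _, goodLast_of_forall _ ?_⟩
  intro x hx
  rcases List.mem_cons.mp hx with h | h
  · rw [h]
    apply str_toList_ne_nil
    rw [String.toList_append]
    exact List.append_ne_nil_of_right_ne_nil _ (by decide)
  · obtain ⟨p, _, hpe⟩ := List.mem_map.mp h
    rw [← hpe]
    apply str_toList_ne_nil
    rw [String.toList_append]
    exact List.append_ne_nil_of_left_ne_nil (by decide) _

theorem bodyfold_good (ps : List (String × String)) (ks : List String) :
    ∀ (body : List String), GoodLast body →
      GoodLast ((ks.map (fun b => chunk b ps)).foldl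
        (fun body block => (if body.isEmpty then body else body ++ [""]) ++ block) body) := by
  induction ks with
  | nil => exact fun body h => h
  | cons b ks ih =>
    intro body h
    rw [List.map_cons, List.foldl_cons]
    exact ih _ (goodLast_append _ _ (chunk_good b ps).2 (chunk_good b ps).1)

theorem group_good (header : String) (ps : List (String × String)) :
    group header ps ≠ [] ∧ GoodLast (group header ps) := by
  refine ⟨List.cons_ne_nil _ _, ?_⟩
  rw [group]
  have hbody := bodyfold_good ps
    (PySem.List.sorted (PySem.Set.ofList (ps.map fun p => p.2)) (fun b => b) false)
    [] (by rw [GoodLast]; simp)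
  cases hb : (((PySem.List.sorted (PySem.Set.ofList (ps.map fun p => p.2)) (fun b => b) false).map
      (fun b => chunk b ps)).foldl
        (fun body block => (if body.isEmpty then body else body ++ [""]) ++ block) []) with
  | nil =>
    rw [GoodLast, List.getLast?_singleton]
    intro h
    have h2 : "\n    " ++ header ++ ":" = "" := by injection h
    apply str_toList_ne_nil (a := "\n    " ++ header ++ ":") _ h2
    rw [String.toList_append]
    exact List.append_ne_nil_of_right_ne_nil _ (by decide)
  | cons y ys =>
    rw [GoodLast, List.getLast?_cons_cons]
    rw [hb] at hbody
    exact hbody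

theorem pairwise_lt_of_le_nodup {β : Type} {l : List (String × β)}
    (hle : l.Pairwise (fun a b => a.1 ≤ b.1)) (hnd : (l.map (fun p => p.1)).Nodup) :
    l.Pairwise (fun a b => a.1 < b.1) := by
  have h1 : l.Pairwise (fun a b => a.1 ≠ b.1) :=
    List.pairwise_map.mp (List.nodup_iff_pairwise_ne.mp hnd)
  exact (hle.and h1).imp fun h => lt_of_le_of_ne h.1 h.2

theorem sorted_items_pairwise (l : List (String × List String)) :
    (PySem.List.sorted (PySem.Dict.ofList l).items (fun p => p.1) false).Pairwise
      (fun a b => a.1 < b.1) := by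
  apply pairwise_lt_of_le_nodup
  · exact PySem.List.sorted_pairwise _ _
  · have hperm := PySem.List.sorted_perm (PySem.Dict.ofList l).items (fun p => p.1) false
    have h2 := hperm.map (fun p => p.1)
    have hk : (PySem.Dict.ofList l).items.map (fun p => p.1) = (PySem.Dict.ofList l).keys := rfl
    rw [hk] at h2
    exact (List.Perm.nodup_iff h2).mpr (PySem.Dict.nodup_keys_ofList l)

def clsStep (acc : List (String × String) × List (String × String))
    (p : String × List String) : List (String × String) × List (String × String) :=
  (if p.2.contains "OUTPUT_ONLY" then acc.1 ++ [(p.1, "OUTPUT_ONLY")]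
    else if p.2.contains "INPUT_ONLY" then acc.1 ++ [(p.1, "INPUT_ONLY")]
    else acc.1,
   if p.2.contains "IMMUTABLE" then acc.2 ++ [(p.1, "IMMUTABLE")] else acc.2)

theorem classify_aux (items : List (String × List String)) :
    ∀ (acc : List (String × String) × List (String × String)),
      items.Pairwise (fun a b => a.1 < b.1) →
      acc.1.Pairwise (fun a b => a.1 < b.1) → acc.2.Pairwise (fun a b => a.1 < b.1) →
      (∀ a ∈ acc.1, ∀ q ∈ items, a.1 < q.1) → (∀ a ∈ acc.2, ∀ q ∈ items, a.1 < q.1) →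
      ((items.foldl clsStep acc).1.Pairwise (fun a b => a.1 < b.1) ∧
       (items.foldl clsStep acc).2.Pairwise (fun a b => a.1 < b.1)) := by
  induction items with
  | nil => exact fun acc _ h1 h2 _ _ => ⟨h1, h2⟩
  | cons p items ih =>
    intro acc hpw h1 h2 hf1 hf2
    rw [List.foldl_cons]
    obtain ⟨hph, hptail⟩ := List.pairwise_cons.mp hpw
    have happ1 : ∀ (s : String), (acc.1 ++ [(p.1, s)]).Pairwise (fun a b => a.1 < b.1) := by
      intro s
      rw [List.pairwise_append]
      refine ⟨h1, List.pairwise_singleton _ _, ?_⟩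
      intro a ha x hx
      rw [List.mem_singleton.mp hx]
      exact hf1 a ha p (List.mem_cons_self ..)
    have happ2 : ∀ (s : String), (acc.2 ++ [(p.1, s)]).Pairwise (fun a b => a.1 < b.1) := by
      intro s
      rw [List.pairwise_append]
      refine ⟨h2, List.pairwise_singleton _ _, ?_⟩
      intro a ha x hx
      rw [List.mem_singleton.mp hx]
      exact hf2 a ha p (List.mem_cons_self ..)
    have hmem1 : ∀ (s : String), ∀ a ∈ acc.1 ++ [(p.1, s)], ∀ q ∈ items, a.1 < q.1 := by
      intro s a ha q hq
      rcases List.mem_append.mp ha with h | h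
      · exact hf1 a h q (List.mem_cons_of_mem _ hq)
      · rw [List.mem_singleton.mp h]; exact hph q hq
    have hmem2 : ∀ (s : String), ∀ a ∈ acc.2 ++ [(p.1, s)], ∀ q ∈ items, a.1 < q.1 := by
      intro s a ha q hq
      rcases List.mem_append.mp ha with h | h
      · exact hf2 a h q (List.mem_cons_of_mem _ hq)
      · rw [List.mem_singleton.mp h]; exact hph q hq
    refine ih (clsStep acc p) hptail ?_ ?_ ?_ ?_ <;>
      · rw [clsStep]
        split_ifs <;>
          first
            | exact happ1 _ | exact happ2 _ | exact h1 | exact h2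
            | exact hmem1 _ | exact hmem2 _
            | exact fun a ha q hq => hf1 a ha q (List.mem_cons_of_mem _ hq)
            | exact fun a ha q hq => hf2 a ha q (List.mem_cons_of_mem _ hq)

theorem classify_pairwise (items : List (String × List String))
    (h : items.Pairwise (fun a b => a.1 < b.1)) :
    (items.foldl
      (fun acc (p : String × List String) =>
        let ig := if p.2.contains "OUTPUT_ONLY" then acc.1 ++ [(p.1, "OUTPUT_ONLY")]
          else if p.2.contains "INPUT_ONLY" then acc.1 ++ [(p.1, "INPUT_ONLY")]
          else acc.1
        let rc := if p.2.contains "IMMUTABLE" then acc.2 ++ [(p.1, "IMMUTABLE")] else acc.2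
        (ig, rc))
      (([], []) : List (String × String) × List (String × String))).1.Pairwise
        (fun a b => a.1 < b.1) ∧
    (items.foldl
      (fun acc (p : String × List String) =>
        let ig := if p.2.contains "OUTPUT_ONLY" then acc.1 ++ [(p.1, "OUTPUT_ONLY")]
          else if p.2.contains "INPUT_ONLY" then acc.1 ++ [(p.1, "INPUT_ONLY")]
          else acc.1
        let rc := if p.2.contains "IMMUTABLE" then acc.2 ++ [(p.1, "IMMUTABLE")] else acc.2
        (ig, rc))
      (([], []) : List (String × String) × List (String × String))).2.Pairwise
        (fun a b => a.1 < b.1) := by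
  exact classify_aux items ([], []) h (List.Pairwise.nil) (List.Pairwise.nil)
    (by intro a ha; cases ha) (by intro a ha; cases ha)

theorem step_eq (d : PySem.Dict String (List (String × List String))) (lines : List String) (k : String) :
    resourceStepA d lines k = resourceStepB lines (k, d.getD k []) := by
  unfold resourceStepA resourceStepB
  obtain ⟨h1, h2⟩ := classify_pairwise _ (sorted_items_pairwise (d.getD k []))
  simp only [filterPrefixes_eq_prune _ h1, filterPrefixes_eq_prune _ h2, writeFieldGroup_eq]

theorem sorted_items_eq (d : PySem.Dict String (List (String × List String)))
    (hnd : d.keys.Nodup) :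
    PySem.List.sorted d.items (fun p => p.1) false =
      (PySem.List.sorted d.keys (fun r => r) false).map (fun k => (k, d.getD k [])) := by
  apply PySem.List.sorted_eq_of_perm_of_pairwise_lt
  · have h1 := PySem.List.sorted_perm d.keys (fun r => r) false
    have h2 := h1.map (fun k => (k, d.getD k []))
    rw [← PySem.Dict.items_eq_map_keys d hnd []] at h2
    exact h2
  · rw [List.pairwise_map]
    have hle := PySem.List.sorted_pairwise d.keys (fun r => r)
    have hnd2 : (PySem.List.sorted d.keys (fun r => r) false).Nodup :=
      (List.Perm.nodup_iff (PySem.List.sorted_perm d.keys (fun r => r) false)).mpr hnd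
    exact (hle.and (List.nodup_iff_pairwise_ne.mp hnd2)).imp fun h => lt_of_le_of_ne h.1 h.2

theorem branches_good (parts : List String) (r : String) (ig rc : List (String × String)) :
    GoodLast (if ig.isEmpty && rc.isEmpty then
        parts ++ ["\n  # " ++ r ++ ": no api field behaviors"]
      else
        (if !ig.isEmpty then
          (if !rc.isEmpty then (parts ++ ["\n  " ++ r ++ ":"]) ++ group "recreate_on_changes" rc
            else parts ++ ["\n  " ++ r ++ ":"]) ++ group "ignore_remote_changes" ig
          else
          (if !rc.isEmpty then (parts ++ ["\n  " ++ r ++ ":"]) ++ group "recreate_on_changes" rc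
            else parts ++ ["\n  " ++ r ++ ":"]))) := by
  split_ifs with hb hig hrc hrc
  · apply goodLast_append _ _ _ (List.cons_ne_nil _ _)
    apply goodLast_of_forall
    intro x hx
    rw [List.mem_singleton.mp hx]
    apply str_toList_ne_nil
    rw [String.toList_append]
    exact List.append_ne_nil_of_right_ne_nil _ (by decide)
  · exact goodLast_append _ _ (group_good _ _).2 (group_good _ _).1
  · exact goodLast_append _ _ (group_good _ _).2 (group_good _ _).1
  · exact goodLast_append _ _ (group_good _ _).2 (group_good _ _).1
  · exfalso
    apply hb
    rw [Bool.and_eq_true_iff]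
    constructor
    · cases hi : ig.isEmpty
      · rw [hi] at hig; simp at hig
      · rfl
    · cases hr : rc.isEmpty
      · rw [hr] at hrc; simp at hrc
      · rfl

theorem stepB_good (parts : List String) (rb : String × List (String × List String)) :
    GoodLast (resourceStepB parts rb) := by
  unfold resourceStepB
  exact branches_good parts rb.1 _ _

theorem foldB_good (xs : List (String × List (String × List String))) :
    ∀ (parts : List String), GoodLast parts → GoodLast (xs.foldl resourceStepB parts) := by
  induction xs with
  | nil => exact fun parts h => h
  | cons x xs ih => exact fun parts _ => by rw [List.foldl_cons]; exact ih _ (stepB_good _ _)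

theorem dropTrailingEmpty_id (l : List String) (h : l.getLast? ≠ some "") :
    dropTrailingEmpty l = l := by
  induction l with
  | nil => rfl
  | cons x xs ih =>
    cases xs with
    | nil =>
      have hx : x ≠ "" := by simpa using h
      simp [dropTrailingEmpty, hx]
    | cons y ys =>
      have h' : (y :: ys).getLast? ≠ some "" := by rwa [List.getLast?_cons_cons] at h
      show (let r := dropTrailingEmpty (y :: ys);
        if r.isEmpty && x == "" then [] else x :: r) = x :: y :: ys
      rw [ih h']
      simp

-- ===== VERDICT (by name: the statement is the Claim_ definition above) =====
set_option maxRecDepth 10000 in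
theorem generate_spec : Claim_equal_generate := by
  intro rb _
  show generate rb = generate_alt rb
  have hnd := PySem.Dict.nodup_keys_ofList rb
  have hL : (PySem.List.sorted (PySem.Dict.ofList rb).keys (fun r => r) false).foldl
        (resourceStepA (PySem.Dict.ofList rb)) [pvHeader]
      = (PySem.List.sorted (PySem.Dict.ofList rb).items (fun p => p.1) false).foldl
          resourceStepB [pvHeaderAlt] := by
    show _ = (PySem.List.sorted (PySem.Dict.ofList rb).items (fun p => p.1) false).foldl
      resourceStepB [pvHeader]
    rw [sorted_items_eq _ hnd, List.foldl_map]
    have hstep : (fun (parts : List String) (k : String) =>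
        resourceStepB parts (k, (PySem.Dict.ofList rb).getD k []))
        = resourceStepA (PySem.Dict.ofList rb) := by
      funext parts k
      exact (step_eq _ parts k).symm
    rw [hstep]
  have hgood : GoodLast
      ((PySem.List.sorted (PySem.Dict.ofList rb).items (fun p => p.1) false).foldl
        resourceStepB [pvHeaderAlt]) := by
    apply foldB_good
    rw [GoodLast, List.getLast?_singleton]
    intro h
    have h2 : pvHeaderAlt = "" := by injection h
    exact absurd h2 (by decide)
  show PySem.Str.join "\n" (dropTrailingEmpty
      ((PySem.List.sorted (PySem.Dict.ofList rb).keys (fun r => r) false).foldl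
        (resourceStepA (PySem.Dict.ofList rb)) [pvHeader]))
    = PySem.Str.join "\n"
      ((PySem.List.sorted (PySem.Dict.ofList rb).items (fun p => p.1) false).foldl
        resourceStepB [pvHeaderAlt])
  rw [hL, dropTrailingEmpty_id _ hgood]
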